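-- pv_equiv track=rewrite | github.com/nitimoy/miRNAProtPred | protPred.py | transcription_translation
-- ===== SOURCE A (Python) =====
-- genetic_code = {
--     "A": "GCU", "R": "CGU", "N": "AAU", "D": "GAU",
--     "C": "UGU", "Q": "CAA", "E": "GAA", "G": "GGU",
--     "H": "CAU", "I": "AUU", "L": "UUA", "K": "AAA",
--     "M": "AUG", "F": "UUU", "P": "CCU", "S": "UCU",
--     "T": "ACU", "W": "UGG", "Y": "UAU", "V": "GUU",
--     "*": "UAA"
-- }
--
-- def transcription_translation(sequence):
--     if all(nucleotide in "ATGC" for nucleotide in sequence):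
--         input_format = "DNA"
--     elif all(nucleotide in "AUGC" for nucleotide in sequence):
--         input_format = "RNA"
--     else:
--         input_format = "Protein"
--
--     if input_format == "Protein":
--         # Transcribe protein to RNA
--         rna_sequence = protein_to_rna(sequence)
--         # Translate RNA to DNA
--         dna_sequence = rna_to_dna(rna_sequence)
--     elif input_format == "RNA":
--         # Translate RNA to DNA
--         dna_sequence = rna_to_dna(sequence)
--     elif input_format == "DNA":
--         # Directly use DNA sequence
--         dna_sequence = sequence
--     else:
--         raise ValueError("Invalid input format")
--
--     return dna_sequence
--
-- def protein_to_rna(protein_sequence):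
--     rna_sequence = ""
--     for amino_acid in protein_sequence:
--         if amino_acid in genetic_code:
--             codon = genetic_code[amino_acid]
--             rna_sequence += codon
--     return rna_sequence
--
-- def rna_to_dna(rna_sequence):
--     dna_sequence = ""
--     for nucleotide in rna_sequence:
--         if nucleotide == "U":
--             dna_sequence += "T"
--         else:
--             dna_sequence += nucleotide
--     return dna_sequence
-- ===== SOURCE B (Python) =====
-- genetic_code = {
--     "A": "GCU", "R": "CGU", "N": "AAU", "D": "GAU",
--     "C": "UGU", "Q": "CAA", "E": "GAA", "G": "GGU",
--     "H": "CAU", "I": "AUU", "L": "UUA", "K": "AAA",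
--     "M": "AUG", "F": "UUU", "P": "CCU", "S": "UCU",
--     "T": "ACU", "W": "UGG", "Y": "UAU", "V": "GUU",
--     "*": "UAA"
-- }
--
-- # DNA codon table precomputed once (U already replaced by T).
-- dna_code = {aa: codon.replace("U", "T") for aa, codon in genetic_code.items()}
--
--
-- def transcription_translation(sequence):
--     # ONE pass: maintain both format flags and both candidate outputs
--     # simultaneously, then select at the end. No classify-then-reconvert stages.
--     is_dna = True
--     is_rna = True
--     rna_as_dna = []   # sequence with U -> T
--     prot_as_dna = []  # DNA codons for recognised amino acids
--     for c in sequence: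
--         if c not in "ATGC":
--             is_dna = False
--         if c not in "AUGC":
--             is_rna = False
--         rna_as_dna.append("T" if c == "U" else c)
--         codon = dna_code.get(c)
--         if codon is not None:
--             prot_as_dna.append(codon)
--     if is_dna:
--         return sequence
--     if is_rna:
--         return "".join(rna_as_dna)
--     return "".join(prot_as_dna)
-- ===== Notes on version B (the rewrite author's own statement) =====
-- stated objective: alternative
-- what changed: Replaces A's staged pipeline (two classification scans, then protein->RNA, then a separate RNA->DNA rescan) with a single fold over the sequence that maintains both format flags and both candidate DNA outputs at once, selecting the result at the end; the RNA intermediate string and all extra passes disappear.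
import Mathlib
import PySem

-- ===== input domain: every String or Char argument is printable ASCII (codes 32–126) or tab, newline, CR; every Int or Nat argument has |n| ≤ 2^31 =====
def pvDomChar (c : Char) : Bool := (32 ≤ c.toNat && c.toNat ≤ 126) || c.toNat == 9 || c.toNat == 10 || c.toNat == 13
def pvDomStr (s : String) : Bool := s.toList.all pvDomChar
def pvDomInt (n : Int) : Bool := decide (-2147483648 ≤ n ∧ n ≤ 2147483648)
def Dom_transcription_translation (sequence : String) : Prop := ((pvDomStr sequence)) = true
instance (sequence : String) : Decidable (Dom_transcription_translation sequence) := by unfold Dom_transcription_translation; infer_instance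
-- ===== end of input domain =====

-- B replaces A's staged classify-then-convert pipeline with ONE fold that maintains both
-- format flags and both candidate DNA outputs simultaneously; same results, one pass.

-- ===== PORT A =====
def geneticCode : List (Char × String) :=
  [('A', "GCU"), ('R', "CGU"), ('N', "AAU"), ('D', "GAU"),
   ('C', "UGU"), ('Q', "CAA"), ('E', "GAA"), ('G', "GGU"),
   ('H', "CAU"), ('I', "AUU"), ('L', "UUA"), ('K', "AAA"),
   ('M', "AUG"), ('F', "UUU"), ('P', "CCU"), ('S', "UCU"),
   ('T', "ACU"), ('W', "UGG"), ('Y', "UAU"), ('V', "GUU"),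
   ('*', "UAA")]

def protein_to_rna (protein_sequence : String) : String :=
  String.ofList (protein_sequence.toList.foldl
    (fun acc amino_acid =>
      match List.lookup amino_acid geneticCode with
      | some codon => acc ++ codon.toList
      | none => acc) [])

def rna_to_dna (rna_sequence : String) : String :=
  String.ofList (rna_sequence.toList.foldl
    (fun acc nucleotide => if nucleotide = 'U' then acc ++ ['T'] else acc ++ [nucleotide]) [])

def transcription_translation (sequence : String) : String :=
  let input_format :=
    if sequence.toList.all (fun c => "ATGC".toList.contains c) then "DNA"
    else if sequence.toList.all (fun c => "AUGC".toList.contains c) then "RNA"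
    else "Protein"
  if input_format = "Protein" then rna_to_dna (protein_to_rna sequence)
  else if input_format = "RNA" then rna_to_dna sequence
  else if input_format = "DNA" then sequence
  else sequence  -- Python's 'raise ValueError' branch: unreachable, input_format is always one of the three

-- ===== PORT B =====
def dnaCode : List (Char × String) :=
  geneticCode.map (fun p => (p.1, PySem.Str.replace p.2 "U" "T"))

-- one-pass step: (is_dna, is_rna, rna_as_dna, prot_as_dna)
def altStep (st : Bool × Bool × List Char × List Char) (c : Char) :
    Bool × Bool × List Char × List Char :=
  ((if "ATGC".toList.contains c then st.1 else false),
   (if "AUGC".toList.contains c then st.2.1 else false),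
   st.2.2.1 ++ [if c = 'U' then 'T' else c],
   st.2.2.2 ++ (match List.lookup c dnaCode with
                | some codon => codon.toList
                | none => []))

def transcription_translation_alt (sequence : String) : String :=
  let st := sequence.toList.foldl altStep (true, true, [], [])
  if st.1 then sequence
  else if st.2.1 then String.ofList st.2.2.1
  else String.ofList st.2.2.2

-- ===== PRECONDITION & SPEC =====
def Spec_transcription_translation (sequence : String) (out : String) : Prop := out = transcription_translation_alt sequence
instance (sequence : String) (out : String) : Decidable (Spec_transcription_translation sequence out) := by unfold Spec_transcription_translation; infer_instance

-- ===== CLAIM (what is proved, stated in full; the proofs are below) =====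
def Claim_equal_transcription_translation : Prop := ∀ (sequence : String), Dom_transcription_translation sequence → Spec_transcription_translation sequence (transcription_translation sequence)

-- ===== LEMMAS AND PROOFS =====

theorem foldl_altStep (l : List Char) (d r : Bool) (ra pa : List Char) :
    l.foldl altStep (d, r, ra, pa)
      = (d && l.all (fun c => "ATGC".toList.contains c),
         r && l.all (fun c => "AUGC".toList.contains c),
         ra ++ l.map (fun c => if c = 'U' then 'T' else c),
         pa ++ l.flatMap (fun c => ((List.lookup c dnaCode).getD "").toList)) := by
  induction l generalizing d r ra pa with
  | nil => simp
  | cons c t ih =>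
    simp only [List.foldl_cons, altStep]
    rw [ih]
    cases h3 : List.lookup c dnaCode <;> cases d <;> cases r <;>
      by_cases h1 : ("ATGC".toList.contains c) = true <;>
        by_cases h2 : ("AUGC".toList.contains c) = true <;>
          simp [h3, List.all_cons]

theorem foldl_u2t (l : List Char) (acc : List Char) :
    l.foldl (fun acc c => if c = 'U' then acc ++ ['T'] else acc ++ [c]) acc
      = acc ++ l.map (fun c => if c = 'U' then 'T' else c) := by
  induction l generalizing acc with
  | nil => simp
  | cons c t ih => by_cases h : c = 'U' <;> simp [h, ih]

theorem foldl_codons (l : List Char) (acc : List Char) :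
    l.foldl (fun acc aa =>
        match List.lookup aa geneticCode with
        | some codon => acc ++ codon.toList
        | none => acc) acc
      = acc ++ l.flatMap (fun aa => ((List.lookup aa geneticCode).getD "").toList) := by
  induction l generalizing acc with
  | nil => simp
  | cons c t ih =>
    cases h : List.lookup c geneticCode <;> simp [h, ih]

theorem lookup_dnaCode (c : Char) :
    List.lookup c dnaCode = (List.lookup c geneticCode).map (fun s => PySem.Str.replace s "U" "T") := by
  unfold dnaCode
  induction geneticCode with
  | nil => rfl
  | cons p t ih => cases h : c == p.1 <;> simp [List.lookup, h, ih]

theorem codon_replace (c : Char) :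
    ((List.lookup c dnaCode).getD "").toList
      = (((List.lookup c geneticCode).getD "").toList).map (fun c => if c = 'U' then 'T' else c) := by
  rw [lookup_dnaCode]
  unfold geneticCode
  simp only [List.lookup]
  repeat' split
  all_goals rfl

-- ===== VERDICT (by name: the statement is the Claim_ definition above) =====
theorem transcription_translation_spec : Claim_equal_transcription_translation := by
  intro sequence _
  unfold Spec_transcription_translation transcription_translation transcription_translation_alt
  simp only [foldl_altStep, Bool.true_and, List.nil_append]
  cases h1 : sequence.toList.all (fun c => "ATGC".toList.contains c) <;>
    cases h2 : sequence.toList.all (fun c => "AUGC".toList.contains c)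
  · simp [rna_to_dna, protein_to_rna, foldl_codons, foldl_u2t,
          List.map_flatMap, codon_replace]
  · simp [rna_to_dna, foldl_u2t]
  · simp
  · simp
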